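-- pv_equiv track=rewrite | github.com/guesung/Algorithm | 프로그래머스/lv1/76501. 음양 더하기/음양 더하기.py | solution
-- ===== SOURCE A (Python) =====
-- def solution(absolutes, signs):
--     # sign=true ; 양수 / =false ; 음수
--     r=0
--     # r=sum(absolutes*(-1)**signs)
--
--     for i in range(len(absolutes)):
--         if signs[i]:
--             r+=absolutes[i]
--         else:
--             r-=absolutes[i]
--
--
--     return r
-- ===== SOURCE B (Python) =====
-- def solution(absolutes, signs):
--     total = sum(absolutes)
--     negatives = sum(a for a, s in zip(absolutes, signs) if not s)
--     return total - 2 * negatives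
-- ===== Notes on version B (the rewrite author's own statement) =====
-- stated objective: alternative
-- what changed: Replaces the single index-driven signed accumulation by a baseline-plus-correction: sum all absolutes in one pass, then subtract twice the sum of the entries with falsy sign, computed over zip.
import Mathlib
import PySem

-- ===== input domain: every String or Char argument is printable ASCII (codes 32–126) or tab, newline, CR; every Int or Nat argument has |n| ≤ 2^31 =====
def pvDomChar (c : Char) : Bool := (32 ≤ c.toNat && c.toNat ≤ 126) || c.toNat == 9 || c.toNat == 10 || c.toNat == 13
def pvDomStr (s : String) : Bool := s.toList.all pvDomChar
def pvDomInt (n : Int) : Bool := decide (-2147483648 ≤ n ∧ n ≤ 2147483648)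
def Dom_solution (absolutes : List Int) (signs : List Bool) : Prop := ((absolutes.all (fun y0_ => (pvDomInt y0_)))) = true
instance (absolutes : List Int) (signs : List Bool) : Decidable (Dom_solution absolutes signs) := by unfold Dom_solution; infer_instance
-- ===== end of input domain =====

-- B replaces A's single signed accumulation by sum(absolutes) minus twice the falsy-sign sum (objective: alternative decomposition).

-- ===== PORT A =====
def solution (absolutes : List Int) (signs : List Bool) : Int :=
  (PySem.List.pyRange 0 absolutes.length 1).foldl
    (fun r i =>
      if PySem.List.pyGetD signs i false then r + PySem.List.pyGetD absolutes i 0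
      else r - PySem.List.pyGetD absolutes i 0) 0

-- ===== PORT B =====
def solution_alt (absolutes : List Int) (signs : List Bool) : Int :=
  let total := absolutes.foldl (· + ·) 0
  let negatives := (absolutes.zip signs).foldl (fun acc p => if !p.2 then acc + p.1 else acc) 0
  total - 2 * negatives

-- ===== PRECONDITION & SPEC =====
-- A indexes signs[i] for every i < len(absolutes); it raises IndexError when signs is shorter.
def Pre_solution (absolutes : List Int) (signs : List Bool) : Prop :=
  absolutes.length ≤ signs.length
instance (absolutes : List Int) (signs : List Bool) : Decidable (Pre_solution absolutes signs) := by
  unfold Pre_solution; infer_instance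
def pvWitness_solution : List Int × List Bool := ([4, 7, 12], [true, false, true])

def Spec_solution (absolutes : List Int) (signs : List Bool) (out : Int) : Prop := out = solution_alt absolutes signs
instance (absolutes : List Int) (signs : List Bool) (out : Int) : Decidable (Spec_solution absolutes signs out) := by unfold Spec_solution; infer_instance

-- ===== CLAIM (what is proved, stated in full; the proofs are below) =====
def Claim_equal_solution : Prop := ∀ (absolutes : List Int) (signs : List Bool), Dom_solution absolutes signs → Pre_solution absolutes signs → Spec_solution absolutes signs (solution absolutes signs)

-- ===== LEMMAS AND PROOFS =====

/-- The common reference value: the signed sum over the paired lists. -/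
def sgnSum : List Int → List Bool → Int
  | a :: as, s :: ss => (if s then a else -a) + sgnSum as ss
  | _, _ => 0

lemma loop_eq : ∀ (as : List Int) (ss : List Bool), as.length ≤ ss.length → ∀ (r : Int),
    (List.range as.length).foldl
      (fun x y => if ss.getD y false then x + as.getD y 0 else x - as.getD y 0) r
      = r + sgnSum as ss := by
  intro as
  induction as with
  | nil => intro ss _ r; simp [sgnSum]
  | cons a as ih =>
    intro ss hle r
    cases ss with
    | nil => simp at hle
    | cons s ss =>
      have hle' : as.length ≤ ss.length := by simpa using hle
      rw [List.length_cons, List.range_succ_eq_map, List.foldl_cons, List.foldl_map]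
      simp only [List.getD_cons_zero, List.getD_cons_succ]
      rw [ih ss hle']
      simp [sgnSum]
      split <;> ring

lemma solution_eq_sgnSum (absolutes : List Int) (signs : List Bool)
    (h : absolutes.length ≤ signs.length) :
    solution absolutes signs = sgnSum absolutes signs := by
  unfold solution
  rw [PySem.List.pyRange_one]
  simp only [sub_zero, Int.toNat_natCast, List.foldl_map, zero_add,
    PySem.List.pyGetD_natCast]
  simpa using loop_eq absolutes signs h 0

lemma foldl_add_shift (as : List Int) (r : Int) :
    as.foldl (· + ·) r = r + as.foldl (· + ·) 0 := by
  induction as generalizing r with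
  | nil => simp
  | cons a as ih =>
    simp only [List.foldl_cons]
    rw [ih, ih (0 + a)]
    ring

lemma foldl_neg_shift (l : List (Int × Bool)) (r : Int) :
    l.foldl (fun acc p => if !p.2 then acc + p.1 else acc) r
      = r + l.foldl (fun acc p => if !p.2 then acc + p.1 else acc) 0 := by
  induction l generalizing r with
  | nil => simp
  | cons p l ih =>
    simp only [List.foldl_cons]
    rw [ih, ih (if !p.2 then 0 + p.1 else 0)]
    split <;> ring

lemma solution_alt_eq_sgnSum (absolutes : List Int) (signs : List Bool)
    (h : absolutes.length ≤ signs.length) :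
    solution_alt absolutes signs = sgnSum absolutes signs := by
  unfold solution_alt
  induction absolutes generalizing signs with
  | nil => simp [sgnSum]
  | cons a as ih =>
    cases signs with
    | nil => simp at h
    | cons s ss =>
      have h' : as.length ≤ ss.length := by simpa using h
      simp only [List.zip_cons_cons, List.foldl_cons, sgnSum]
      rw [foldl_add_shift, foldl_neg_shift]
      have hih := ih ss h'
      simp only at hih
      rw [← hih]
      cases s <;> simp <;> ring

-- ===== VERDICT (by name: the statement is the Claim_ definition above) =====
theorem solution_spec : Claim_equal_solution := by
  intro absolutes signs _ hpre
  unfold Spec_solution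
  rw [solution_eq_sgnSum absolutes signs hpre, solution_alt_eq_sgnSum absolutes signs hpre]
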